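-- pv_equiv track=rewrite | github.com/Nkzono99/hpc-simctl | src/simctl/adapters/namelist.py | _find_comment_pos
-- ===== SOURCE A (Python) =====
-- def _find_comment_pos(value_str: str) -> int:
--     """Find position of trailing ``!`` comment, ignoring quoted strings.
--
--     Returns:
--         Index of the comment character, or -1 if none found.
--     """
--     in_string = False
--     quote_char = ""
--     for i, ch in enumerate(value_str):
--         if in_string:
--             if ch == quote_char:
--                 in_string = False
--         elif ch in ('"', "'"):
--             in_string = True
--             quote_char = ch
--         elif ch == "!":
--             return i
--     return -1
-- ===== SOURCE B (Python) =====
-- def _find_comment_pos(value_str: str) -> int: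
--     """Find position of trailing ``!`` comment, ignoring quoted strings.
--
--     Staged approach: first extract the stream of significant-character
--     events (quotes and bangs) with their positions, then resolve quoting
--     on that event stream alone, never re-touching the original string.
--     """
--     events = [(i, ch) for i, ch in enumerate(value_str) if ch in '"\'!']
--     k = 0
--     n = len(events)
--     while k < n:
--         i, ch = events[k]
--         if ch == "!":
--             return i
--         # ch opens a quote: skip events until the matching close quote
--         k += 1
--         while k < n and events[k][1] != ch:
--             k += 1
--         k += 1  # past the close (or past the end if unterminated)
--     return -1
-- ===== Notes on version B (the rewrite author's own statement) =====
-- stated objective: alternative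
-- what changed: Replaced the per-character in_string/quote_char state machine over the whole string with a staged design: a first pass filters out an event list of (position, char) for quotes and bangs only, and a second loop resolves quoting purely on that event stream, skipping to each matching close-quote event.
import Mathlib
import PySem

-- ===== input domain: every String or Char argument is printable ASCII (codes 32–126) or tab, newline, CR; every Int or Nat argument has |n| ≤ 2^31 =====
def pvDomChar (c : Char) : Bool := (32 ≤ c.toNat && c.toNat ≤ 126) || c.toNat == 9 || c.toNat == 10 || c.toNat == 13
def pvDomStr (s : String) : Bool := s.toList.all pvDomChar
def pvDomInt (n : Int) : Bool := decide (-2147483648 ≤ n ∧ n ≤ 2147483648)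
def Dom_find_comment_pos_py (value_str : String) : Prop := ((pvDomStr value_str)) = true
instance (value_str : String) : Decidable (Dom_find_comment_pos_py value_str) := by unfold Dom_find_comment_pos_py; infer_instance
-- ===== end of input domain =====

-- B replaces A's per-character quote state machine with a staged design: extract
-- an event list of quotes/bangs first, then resolve quoting on events only (alternative; same cost).


-- ===== PORT A =====
-- state machine over (in_string, quote_char); quote_char kept as String like Python
def pvGoA : List Char → Nat → Bool → String → Int
  | [], _, _, _ => -1
  | ch :: rest, i, in_string, quote_char =>
    if in_string then
      if String.ofList [ch] == quote_char then pvGoA rest (i+1) false quote_char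
      else pvGoA rest (i+1) true quote_char
    else if ch == '"' || ch == '\'' then pvGoA rest (i+1) true (String.ofList [ch])
    else if ch == '!' then (i : Int)
    else pvGoA rest (i+1) false quote_char

def find_comment_pos_py (value_str : String) : Int :=
  pvGoA value_str.toList 0 false ""

-- ===== PORT B =====
-- pass 1: the event list [(i, ch) for i, ch in enumerate(s) if ch in '"\'!']
def pvEventsFrom (i : Nat) : List Char → List (Nat × Char)
  | [] => []
  | c :: rest =>
    if c == '"' || c == '\'' || c == '!' then (i, c) :: pvEventsFrom (i+1) rest
    else pvEventsFrom (i+1) rest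

-- inner while: drop events up to and including the matching close quote
def pvSkip (q : Char) : List (Nat × Char) → List (Nat × Char)
  | [] => []
  | e :: rest => if e.2 == q then rest else pvSkip q rest

theorem pvSkip_len (q : Char) : ∀ (l : List (Nat × Char)), (pvSkip q l).length ≤ l.length := by
  intro l
  induction l with
  | nil => simp [pvSkip]
  | cons e rest ih =>
    simp only [pvSkip]
    split
    · simp
    · exact le_trans ih (by simp)

-- outer while over the event stream
def pvGoB : List (Nat × Char) → Int
  | [] => -1
  | (i, ch) :: rest => if ch == '!' then (i : Int) else pvGoB (pvSkip ch rest)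
termination_by l => l.length
decreasing_by
  exact Nat.lt_succ_of_le (pvSkip_len _ _)

def find_comment_pos_py_alt (value_str : String) : Int :=
  pvGoB (pvEventsFrom 0 value_str.toList)

-- ===== PRECONDITION & SPEC =====
def Spec_find_comment_pos_py (value_str : String) (out : Int) : Prop := out = find_comment_pos_py_alt value_str
instance (value_str : String) (out : Int) : Decidable (Spec_find_comment_pos_py value_str out) := by unfold Spec_find_comment_pos_py; infer_instance

-- ===== CLAIM (what is proved, stated in full; the proofs are below) =====
def Claim_equal_find_comment_pos_py : Prop := ∀ (value_str : String), Dom_find_comment_pos_py value_str → Spec_find_comment_pos_py value_str (find_comment_pos_py value_str)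

-- ===== LEMMAS AND PROOFS =====
theorem pv_singleton_beq (c q : Char) : (String.ofList [c] == String.ofList [q]) = (c == q) := by
  by_cases h : c = q
  · subst h; simp
  · have hs : ¬ String.ofList [c] = String.ofList [q] := by
      intro hs
      have h2 := congrArg String.toList hs
      simp at h2
      exact h h2
    simp [hs, h]

-- simultaneous invariant: out-of-string A = B on events; in-string A = B after skipping to the close
theorem pvGoB_nil : pvGoB [] = -1 := by rw [pvGoB]

theorem pvGoB_cons (i : Nat) (ch : Char) (rest : List (Nat × Char)) :
    pvGoB ((i, ch) :: rest) = if ch == '!' then (i : Int) else pvGoB (pvSkip ch rest) := by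
  rw [pvGoB]

theorem pv_main : ∀ (l : List Char),
    (∀ (i : Nat) (qs : String), pvGoA l i false qs = pvGoB (pvEventsFrom i l)) ∧
    (∀ (i : Nat) (q : Char), q = '"' ∨ q = '\'' →
      pvGoA l i true (String.ofList [q]) = pvGoB (pvSkip q (pvEventsFrom i l))) := by
  intro l
  induction l with
  | nil =>
    constructor
    · intro i qs; simp [pvGoA, pvEventsFrom, pvGoB_nil]
    · intro i q _; simp [pvGoA, pvEventsFrom, pvSkip, pvGoB_nil]
  | cons c rest ih =>
    obtain ⟨ihP, ihQ⟩ := ih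
    constructor
    · intro i qs
      by_cases hq : c = '"' ∨ c = '\''
      · have hb : (c == '"' || c == '\'') = true := by
          rcases hq with h | h <;> simp [h]
        have hbang : (c == '!') = false := by
          rcases hq with h | h <;> simp [h]
        simp only [pvGoA, Bool.false_eq_true, if_false, hb, if_true, pvEventsFrom,
          Bool.true_or]
        rw [pvGoB_cons, if_neg (by simp [hbang])]
        exact ihQ (i+1) c hq
      · have hb : (c == '"' || c == '\'') = false := by
          rcases not_or.mp hq with ⟨h1, h2⟩; simp [h1, h2]
        by_cases hbang : c = '!'
        · subst hbang
          simp [pvGoA, pvEventsFrom, hb, pvGoB_cons]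
        · have hb2 : (c == '!') = false := by simp [hbang]
          have hev : (c == '"' || c == '\'' || c == '!') = false := by simp [hb, hb2]
          simp only [pvGoA, pvEventsFrom, hb, hb2, hev, Bool.false_eq_true, if_false]
          exact ihP (i+1) qs
    · intro i q hq
      by_cases hc : c = q
      · subst hc
        have hev : (c == '"' || c == '\'' || c == '!') = true := by
          rcases hq with h | h <;> simp [h]
        have hE : pvSkip c (pvEventsFrom i (c :: rest)) = pvEventsFrom (i+1) rest := by
          simp [pvEventsFrom, hev, pvSkip]
        rw [hE, ← ihP (i+1) (String.ofList [c])]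
        simp [pvGoA, pv_singleton_beq]
      · have hcb : (c == q) = false := by simp [hc]
        have hE : pvSkip q (pvEventsFrom i (c :: rest)) = pvSkip q (pvEventsFrom (i+1) rest) := by
          simp only [pvEventsFrom]
          split
          · simp [pvSkip, hcb]
          · rfl
        rw [hE, ← ihQ (i+1) q hq]
        simp [pvGoA, pv_singleton_beq, hcb]

-- ===== VERDICT (by name: the statement is the Claim_ definition above) =====
theorem find_comment_pos_py_spec : Claim_equal_find_comment_pos_py := by
  intro s _
  unfold Spec_find_comment_pos_py find_comment_pos_py find_comment_pos_py_alt
  exact (pv_main s.toList).1 0 ""
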